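-- pv_equiv track=rewrite | github.com/toddllm/luanti-voyager | luanti_voyager/advanced_llm.py | _summarize_environment
-- ===== SOURCE A (Python) =====
-- from typing import Dict, Any, List, Optional, Tuple
--
-- def _summarize_environment(world_state: Dict[str, Any]) -> str:
--     """Create a summary of the environment."""
--     blocks = world_state.get("nearby_blocks", [])
--     if not blocks:
--         return "No blocks detected"
--
--     block_types = {}
--     for block in blocks:
--         btype = block.get("type", "unknown")
--         block_types[btype] = block_types.get(btype, 0) + 1
--
--     summary = []
--     for btype, count in sorted(block_types.items(), key=lambda x: x[1], reverse=True)[:5]: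
--         if btype != "ignore":
--             summary.append(f"{count}x {btype}")
--
--     return ", ".join(summary) if summary else "Mostly void"
-- ===== SOURCE B (Python) =====
-- from typing import Dict, Any
-- from collections import Counter
--
--
-- def _summarize_environment(world_state: Dict[str, Any]) -> str:
--     """Create a summary of the environment."""
--     blocks = world_state.get("nearby_blocks", [])
--     if not blocks:
--         return "No blocks detected"
--
--     counts = Counter(block.get("type", "unknown") for block in blocks)
--
--     # Bounded top-5 selection: keep a descending (stable) list of at most
--     # five (type, count) pairs instead of sorting all distinct types.
--     top = []
--     for item in counts.items():
--         i = 0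
--         while i < len(top) and top[i][1] >= item[1]:
--             i += 1
--         top.insert(i, item)
--         del top[5:]
--
--     parts = [f"{count}x {btype}" for btype, count in top if btype != "ignore"]
--     return ", ".join(parts) if parts else "Mostly void"
-- ===== Notes on version B (the rewrite author's own statement) =====
-- stated objective: alternative
-- what changed: B counts types with collections.Counter and selects the top five by a one-pass bounded stable insertion into a five-element list (top-k selection) instead of fully sorting all distinct types, then formats via a comprehension instead of an append loop.
import Mathlib
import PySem

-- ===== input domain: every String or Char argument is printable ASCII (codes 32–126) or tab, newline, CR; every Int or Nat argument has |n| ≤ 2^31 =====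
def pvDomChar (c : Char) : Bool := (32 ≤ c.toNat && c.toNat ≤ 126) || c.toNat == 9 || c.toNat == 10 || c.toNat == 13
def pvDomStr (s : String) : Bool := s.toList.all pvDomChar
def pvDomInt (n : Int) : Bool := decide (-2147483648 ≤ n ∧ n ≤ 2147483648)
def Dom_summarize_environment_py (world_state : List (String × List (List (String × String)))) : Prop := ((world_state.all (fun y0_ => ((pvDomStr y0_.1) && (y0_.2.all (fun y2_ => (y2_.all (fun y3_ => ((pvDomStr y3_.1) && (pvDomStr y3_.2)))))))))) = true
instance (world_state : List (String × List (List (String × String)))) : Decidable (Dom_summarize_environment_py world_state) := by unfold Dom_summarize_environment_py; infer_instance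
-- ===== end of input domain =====

-- B replaces the full sort of the distinct block types by a one-pass bounded
-- top-5 insertion (alternative selection structure, same exact output).

-- ===== PORT A =====
-- block.get("type", "unknown")
def pyBlockType (block : List (String × String)) : String :=
  (PySem.Dict.mk block).getD "type" "unknown"

def summarize_environment_py (world_state : List (String × List (List (String × String)))) : String :=
  let blocks := (PySem.Dict.mk world_state).getD "nearby_blocks" []
  if blocks = [] then "No blocks detected"
  else
    let block_types : PySem.Dict String Int :=
      blocks.foldl (fun d b => d.insert (pyBlockType b) (d.getD (pyBlockType b) 0 + 1)) PySem.Dict.empty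
    let top := PySem.List.slice (PySem.List.sorted block_types.items (fun x => x.2) true) none (some 5)
    let summary := top.foldl (fun acc x => if x.1 != "ignore" then acc ++ [PySem.Int.toStr x.2 ++ "x " ++ x.1] else acc) []
    if summary = [] then "Mostly void" else PySem.Str.join ", " summary

-- ===== PORT B =====
-- stable descending insertion: x goes before the first element with a strictly smaller count
def pvInsertDesc (x : String × Int) : List (String × Int) → List (String × Int)
  | [] => [x]
  | y :: ys => if y.2 < x.2 then x :: y :: ys else y :: pvInsertDesc x ys

def summarize_environment_py_alt (world_state : List (String × List (List (String × String)))) : String :=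
  let blocks := (PySem.Dict.mk world_state).getD "nearby_blocks" []
  if blocks = [] then "No blocks detected"
  else
    let counts := PySem.Dict.counter (blocks.map pyBlockType)
    let top := counts.items.foldl (fun acc it => (pvInsertDesc it acc).take 5) []
    let parts := (top.filter (fun x => x.1 != "ignore")).map (fun x => PySem.Int.toStr x.2 ++ "x " ++ x.1)
    if parts = [] then "Mostly void" else PySem.Str.join ", " parts

-- ===== PRECONDITION & SPEC =====
def Spec_summarize_environment_py (world_state : List (String × List (List (String × String)))) (out : String) : Prop := out = summarize_environment_py_alt world_state
instance (world_state : List (String × List (List (String × String)))) (out : String) : Decidable (Spec_summarize_environment_py world_state out) := by unfold Spec_summarize_environment_py; infer_instance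

-- ===== CLAIM (what is proved, stated in full; the proofs are below) =====
def Claim_equal_summarize_environment_py : Prop := ∀ (world_state : List (String × List (List (String × String)))), Dom_summarize_environment_py world_state → Spec_summarize_environment_py world_state (summarize_environment_py world_state)

-- ===== LEMMAS AND PROOFS =====

-- B's bounded insertion step is A's stable descending insertBy step
theorem pvInsertDesc_eq_insertBy (x : String × Int) (l : List (String × Int)) :
    pvInsertDesc x l = PySem.List.insertBy (fun a b => decide (b.2 < a.2)) x l := by
  induction l with
  | nil => rfl
  | cons y ys ih => simp [pvInsertDesc, PySem.List.insertBy, ih]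

-- truncating to n before or after an insertion gives the same first n elements
theorem take_insertBy (p : String × Int → String × Int → Bool) (x : String × Int) :
    ∀ (l : List (String × Int)) (n : Nat),
      (PySem.List.insertBy p x l).take n = (PySem.List.insertBy p x (l.take n)).take n := by
  intro l
  induction l with
  | nil => intro n; simp
  | cons y ys ih =>
    intro n
    cases n with
    | zero => simp
    | succ m =>
      simp only [PySem.List.insertBy, List.take_succ_cons]
      by_cases h : p x y = true
      · cases m with
        | zero => simp [h]
        | succ k =>
          simp only [h, if_true, List.take_succ_cons, List.take_take, List.cons.injEq, true_and]
          simp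
      · simp [h, ih m]

-- fold of truncated insertions computes the first n elements of the insertion-sort fold
theorem foldl_take_insertBy (p : String × Int → String × Int → Bool) (n : Nat) :
    ∀ (l acc : List (String × Int)),
      (l.foldl (fun a x => PySem.List.insertBy p x a) acc).take n
        = l.foldl (fun a x => (PySem.List.insertBy p x a).take n) (acc.take n) := by
  intro l
  induction l with
  | nil => intro acc; rfl
  | cons x xs ih =>
    intro acc
    simp only [List.foldl_cons]
    rw [ih (PySem.List.insertBy p x acc), take_insertBy]

-- ===== VERDICT (by name: the statement is the Claim_ definition above) =====
theorem summarize_environment_py_spec : Claim_equal_summarize_environment_py := by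
  intro ws _
  unfold Spec_summarize_environment_py summarize_environment_py summarize_environment_py_alt
  simp only
  set blocks := (PySem.Dict.mk ws).getD "nearby_blocks" [] with hb
  by_cases hblk : blocks = []
  · simp [hblk]
  · simp only [hblk, if_false]
    have hcount :
        blocks.foldl (fun d b => d.insert (pyBlockType b) (d.getD (pyBlockType b) 0 + 1)) PySem.Dict.empty
          = PySem.Dict.counter (blocks.map pyBlockType) := by
      rw [← PySem.Dict.foldl_insert_getD_add_one_eq_counter, List.foldl_map]
    rw [hcount]
    set items := (PySem.Dict.counter (blocks.map pyBlockType)).items with hi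
    have htop :
        PySem.List.slice (PySem.List.sorted items (fun x => x.2) true) none (some 5)
          = items.foldl (fun acc it => (pvInsertDesc it acc).take 5) [] := by
      rw [PySem.List.slice_to _ (by norm_num)]
      rw [PySem.List.sorted_rev_eq_foldl_insertBy]
      have : ((5 : Int)).toNat = 5 := rfl
      rw [this, foldl_take_insertBy]
      simp [pvInsertDesc_eq_insertBy]
    rw [htop]
    set top := items.foldl (fun acc it => (pvInsertDesc it acc).take 5) [] with ht
    rw [PySem.List.foldl_append_if (fun x => x.1 != "ignore")
        (fun x => PySem.Int.toStr x.2 ++ "x " ++ x.1) top []]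
    simp
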